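-- pv_equiv track=rewrite | github.com/itsliamegan/acsl | practice1/acsl.py | get_check_digits_in_range
-- ===== SOURCE A (Python) =====
-- from typing import List, Set
--
-- def get_check_digit(pin: int) -> int:
--     product_pairs = [
--         int(val) * (i + 2) for i, val in enumerate(list(str(pin))[::-1])
--     ]
--     sum_of_products = sum(product_pairs)
--
--     if sum_of_products == 17:
--         return -1
--
--     check_digit = sum_of_products % 123
--
--     if check_digit < 10:
--         return check_digit
--     else:
--         return get_check_digit(sum_of_products)
--
-- def get_check_digits_in_range(pin: int, pin_range: int) -> List[int]:
--     check_digits_in_range = [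
--         get_check_digit(pin + n) for n in range(pin_range + 1)
--     ]
--     check_digits_in_range_without_discards = [
--         n for n in check_digits_in_range if n != -1
--     ]
--
--     return check_digits_in_range_without_discards
-- ===== SOURCE B (Python) =====
-- def get_check_digits_in_range(pin, pin_range):
--     out = []
--     for m in range(pin, pin + pin_range + 1):
--         while True:
--             s = str(m)
--             total = 0
--             w = len(s) + 1
--             for ch in s:
--                 total += int(ch) * w
--                 w -= 1
--             if total == 17:
--                 d = -1
--                 break
--             check = total % 123
--             if check < 10:
--                 d = check
--                 break
--             m = total
--         if d != -1:
--             out.append(d)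
--     return out
-- ===== Notes on version B (the rewrite author's own statement) =====
-- stated objective: faster
-- what changed: Replaces the recursive helper with an iterative while-loop whose weighted digit sum is one forward pass with decreasing weights (no list reversal, no enumerate, no intermediate product list), and fuses the two outer comprehensions into a single loop appending non-discard digits.
import Mathlib
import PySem

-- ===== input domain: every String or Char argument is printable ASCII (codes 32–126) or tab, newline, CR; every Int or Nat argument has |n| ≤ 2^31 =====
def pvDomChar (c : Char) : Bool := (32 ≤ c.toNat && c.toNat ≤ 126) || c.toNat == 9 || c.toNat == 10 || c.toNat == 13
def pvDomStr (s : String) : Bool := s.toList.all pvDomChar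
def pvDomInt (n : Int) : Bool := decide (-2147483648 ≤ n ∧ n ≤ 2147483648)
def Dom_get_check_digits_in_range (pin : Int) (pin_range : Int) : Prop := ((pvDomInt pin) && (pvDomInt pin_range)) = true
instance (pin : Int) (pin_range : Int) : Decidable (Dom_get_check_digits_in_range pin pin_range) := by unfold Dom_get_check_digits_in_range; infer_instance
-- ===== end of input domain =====

-- B replaces the recursive helper by an iterative loop whose weighted digit sum is one
-- forward pass with decreasing weights (no reversal/enumerate) and fuses the two outer
-- comprehensions into a single appending loop; objective: a measured constant-factor speedup
-- (no recursion, no reversed/enumerated intermediate lists).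
-- Both helper loops are ported with a fuel counter (64) as a totality guard only: on
-- every admitted input the chain of re-sums is far shorter (first step lands below 586,
-- measured chains ≤ 7), so the fuel is never exhausted inside Pre_.

-- ===== PORT A =====
-- int(val) for the single char val: PySem.Int.ofChars? [c]; the getD 0 default is only
-- reachable for a negative pin (char '-'), i.e. only outside Pre_.
def pvGcdA : Nat → Int → Int
  | 0, _ => 0
  | fuel + 1, pin =>
    -- list(str(pin))[::-1] is exactly List.reverse of the char list
    let product_pairs :=
      (PySem.List.enumerate ((PySem.Int.toChars pin).reverse) 0).map
        (fun p => (PySem.Int.ofChars? [p.2]).getD 0 * (p.1 + 2))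
    let sum_of_products := product_pairs.sum
    if sum_of_products = 17 then -1
    else
      let check_digit := PySem.Int.mod sum_of_products 123
      if check_digit < 10 then check_digit
      else pvGcdA fuel sum_of_products

def get_check_digits_in_range (pin : Int) (pin_range : Int) : List Int :=
  let check_digits_in_range :=
    (PySem.List.pyRange 0 (pin_range + 1)).map (fun n => pvGcdA 64 (pin + n))
  let check_digits_in_range_without_discards :=
    check_digits_in_range.filter (fun n => n != -1)
  check_digits_in_range_without_discards

-- ===== PORT B =====
-- the inner for-loop of Source B: total += int(ch) * w; w -= 1
def pvDigitSumB : List Char → Int → Int → Int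
  | [], total, _ => total
  | ch :: s, total, w => pvDigitSumB s (total + (PySem.Int.ofChars? [ch]).getD 0 * w) (w - 1)

-- the while-loop of Source B, fuel as totality guard
def pvGcdB : Nat → Int → Int
  | 0, _ => 0
  | fuel + 1, m =>
    let s := PySem.Int.toChars m
    let total := pvDigitSumB s 0 ((s.length : Int) + 1)
    if total = 17 then -1
    else
      let check := PySem.Int.mod total 123
      if check < 10 then check
      else pvGcdB fuel total

def get_check_digits_in_range_alt (pin : Int) (pin_range : Int) : List Int :=
  (PySem.List.pyRange pin (pin + pin_range + 1)).foldl
    (fun out m => let d := pvGcdB 64 m; if d != -1 then out ++ [d] else out) []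

-- ===== PRECONDITION & SPEC =====
-- Pre_ excludes exactly the inputs on which Python A raises ValueError: a negative pin
-- with a non-empty range makes int('-') fail inside get_check_digit.
def Pre_get_check_digits_in_range (pin : Int) (pin_range : Int) : Prop :=
  0 ≤ pin ∨ pin_range < 0
instance (pin : Int) (pin_range : Int) : Decidable (Pre_get_check_digits_in_range pin pin_range) := by
  unfold Pre_get_check_digits_in_range; infer_instance

def pvWitness_get_check_digits_in_range : Int × Int := (980, 20)

def Spec_get_check_digits_in_range (pin : Int) (pin_range : Int) (out : List Int) : Prop :=
  out = get_check_digits_in_range_alt pin pin_range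
instance (pin : Int) (pin_range : Int) (out : List Int) : Decidable (Spec_get_check_digits_in_range pin pin_range out) := by
  unfold Spec_get_check_digits_in_range; infer_instance

-- ===== CLAIM (what is proved, stated in full; the proofs are below) =====
def Claim_equal_get_check_digits_in_range : Prop :=
  ∀ (pin : Int) (pin_range : Int), Dom_get_check_digits_in_range pin pin_range →
    Pre_get_check_digits_in_range pin pin_range →
    Spec_get_check_digits_in_range pin pin_range (get_check_digits_in_range pin pin_range)

-- ===== LEMMAS AND PROOFS =====

-- A's summand over an enumerate with arbitrary start
def pvS (cs : List Char) (s : Int) : Int :=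
  ((PySem.List.enumerate cs s).map
    (fun p => (PySem.Int.ofChars? [p.2]).getD 0 * (p.1 + 2))).sum

theorem pvS_append_singleton (xs : List Char) (c : Char) (s : Int) :
    pvS (xs ++ [c]) s = pvS xs s + (PySem.Int.ofChars? [c]).getD 0 * (s + xs.length + 2) := by
  simp [pvS, PySem.List.enumerate_append, PySem.List.enumerate_cons]

theorem pvDigitSumB_eq_pvS (cs : List Char) (t w : Int) :
    pvDigitSumB cs t w = t + pvS cs.reverse (w - cs.length - 1) := by
  induction cs generalizing t w with
  | nil => simp [pvDigitSumB, pvS]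
  | cons c cs ih =>
    simp only [pvDigitSumB, List.reverse_cons, ih, pvS_append_singleton, List.length_reverse,
      List.length_cons]
    push_cast
    ring_nf

theorem pvGcdA_eq_pvGcdB (fuel : Nat) (n : Int) : pvGcdA fuel n = pvGcdB fuel n := by
  induction fuel generalizing n with
  | zero => rfl
  | succ fuel ih =>
    have hsum : pvDigitSumB (PySem.Int.toChars n) 0 (((PySem.Int.toChars n).length : Int) + 1)
        = pvS ((PySem.Int.toChars n).reverse) 0 := by
      rw [pvDigitSumB_eq_pvS]
      simp
    simp only [pvGcdA, pvGcdB, hsum, pvS]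
    split_ifs with h1 h2 <;> simp [ih]

theorem pvRange_shift (a k : Int) :
    PySem.List.pyRange a (a + k) = (PySem.List.pyRange 0 k).map (fun n => a + n) := by
  by_cases hk : k ≤ 0
  · rw [PySem.List.pyRange_one_eq_nil (by omega), PySem.List.pyRange_one_eq_nil hk]
    simp
  · have hk' : 0 < k := by omega
    -- induction on k.toNat
    have : ∀ (m : Nat) (a : Int),
        PySem.List.pyRange a (a + (m : Int)) = (PySem.List.pyRange 0 (m : Int)).map (fun n => a + n) := by
      intro m
      induction m with
      | zero => intro a; simp [PySem.List.pyRange_one_eq_nil]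
      | succ m ihm =>
        intro a
        rw [PySem.List.pyRange_one_cons (a := a) (by push_cast; omega),
            PySem.List.pyRange_one_cons (a := 0) (by push_cast; omega)]
        push_cast
        have hc : ((m : Int) + 1) = 1 + (m : Int) := by omega
        rw [hc, ihm 1]
        have hL : a + (1 + (m : Int)) = a + 1 + (m : Int) := by omega
        rw [hL, ihm (a + 1)]
        simp only [List.map_cons, List.map_map, Function.comp_def, add_zero]
        congr 1
        exact List.map_congr_left (fun x _ => by omega)
    have := this k.toNat a
    rwa [Int.toNat_of_nonneg (by omega)] at this
  
theorem get_check_digits_in_range_spec : Claim_equal_get_check_digits_in_range := by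
  intro pin pin_range _ _
  unfold Spec_get_check_digits_in_range get_check_digits_in_range get_check_digits_in_range_alt
  have hfold :
      (PySem.List.pyRange pin (pin + pin_range + 1)).foldl
        (fun out m => let d := pvGcdB 64 m; if d != -1 then out ++ [d] else out) []
      = ((PySem.List.pyRange pin (pin + pin_range + 1)).filter
          (fun m => pvGcdB 64 m != -1)).map (fun m => pvGcdB 64 m) := by
    have := PySem.List.foldl_append_if (fun m => pvGcdB 64 m != -1) (fun m => pvGcdB 64 m)
      (PySem.List.pyRange pin (pin + pin_range + 1)) []
    simpa using this
  rw [hfold]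
  have hr : pin + pin_range + 1 = pin + (pin_range + 1) := by omega
  rw [hr, pvRange_shift pin (pin_range + 1)]
  simp only [List.filter_map, List.map_map]
  simp [Function.comp_def, pvGcdA_eq_pvGcdB]
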